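-- pv_equiv track=rewrite | github.com/lbh848/comfyui_hooking_server | modes/prompt_enhance_mode.py | _split_char_blocks
-- ===== SOURCE A (Python) =====
-- def _split_char_blocks(text: str) -> list[str]:
--     """| 로 구분된 캐릭터 블럭 분리. 괄호 안의 | 는 무시."""
--     if not text:
--         return []
--     blocks = []
--     current = []
--     paren_depth = 0
--     for ch in text:
--         if ch == '(':
--             paren_depth += 1
--             current.append(ch)
--         elif ch == ')':
--             paren_depth = max(0, paren_depth - 1)
--             current.append(ch)
--         elif ch == '|' and paren_depth == 0:
--             block = ''.join(current).strip()
--             if block: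
--                 blocks.append(block)
--             current = []
--         else:
--             current.append(ch)
--     block = ''.join(current).strip()
--     if block:
--         blocks.append(block)
--     return blocks
-- ===== SOURCE B (Python) =====
-- def _split_char_blocks(text: str) -> list[str]:
--     """| 로 구분된 캐릭터 블럭 분리. 괄호 안의 | 는 무시."""
--     def cut(s):
--         # index of the first top-level '|'; split there into (head, rest)
--         depth = 0
--         for i, ch in enumerate(s):
--             if ch == '(':
--                 depth += 1
--             elif ch == ')':
--                 depth = max(0, depth - 1)
--             elif ch == '|' and depth == 0:
--                 return s[:i], s[i + 1:]
--         return None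
--
--     blocks = []
--     rest = text
--     while (p := cut(rest)) is not None:
--         head, rest = p
--         head = head.strip()
--         if head:
--             blocks.append(head)
--     last = rest.strip()
--     if last:
--         blocks.append(last)
--     return blocks
-- ===== Notes on version B (the rewrite author's own statement) =====
-- stated objective: alternative
-- what changed: Replaces the single fold that appends every character into a running buffer by a cut-based consumer: a helper finds the next top-level separator and returns the head and rest slices, and a while loop strips and collects heads until no separator is left.
import Mathlib
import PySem

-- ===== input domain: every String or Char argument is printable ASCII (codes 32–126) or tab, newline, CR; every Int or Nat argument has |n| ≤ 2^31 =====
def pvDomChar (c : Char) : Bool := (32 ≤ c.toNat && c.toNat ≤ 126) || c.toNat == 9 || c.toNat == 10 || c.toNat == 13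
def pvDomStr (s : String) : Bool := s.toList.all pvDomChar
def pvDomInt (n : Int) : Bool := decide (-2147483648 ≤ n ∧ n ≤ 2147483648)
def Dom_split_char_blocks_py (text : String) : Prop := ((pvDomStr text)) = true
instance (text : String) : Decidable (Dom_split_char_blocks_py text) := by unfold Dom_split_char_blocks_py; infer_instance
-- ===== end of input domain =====

-- B replaces A's character-buffer fold by a cut-at-next-top-level-'|' loop over slices (alternative structure, same cost).

-- shared transliteration of Python's "block = cs.strip(); if block: blocks.append(block)"
def pvEmit (blocks : List String) (cs : List Char) : List String :=
  let block := PySem.Chars.strip cs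
  if block = [] then blocks else blocks ++ [String.mk block]

-- ===== PORT A =====
def pvStepA (st : List String × List Char × Int) (ch : Char) : List String × List Char × Int :=
  if ch = '(' then (st.1, st.2.1 ++ [ch], st.2.2 + 1)
  else if ch = ')' then (st.1, st.2.1 ++ [ch], max 0 (st.2.2 - 1))
  else if ch = '|' ∧ st.2.2 = 0 then (pvEmit st.1 st.2.1, [], st.2.2)
  else (st.1, st.2.1 ++ [ch], st.2.2)

def split_char_blocks_py (text : String) : List String :=
  if text = "" then []
  else
    let st := text.toList.foldl pvStepA ([], [], 0)
    pvEmit st.1 st.2.1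

-- ===== PORT B =====
-- cut's enumerate scan: index of the first top-level '|' (none if absent)
def pvCutIdx : List Char → Nat → Int → Option Nat
  | [], _, _ => none
  | ch :: rest, i, d =>
    if ch = '(' then pvCutIdx rest (i + 1) (d + 1)
    else if ch = ')' then pvCutIdx rest (i + 1) (max 0 (d - 1))
    else if ch = '|' ∧ d = 0 then some i
    else pvCutIdx rest (i + 1) d

-- cut(s): (s[:i], s[i+1:]) at that index, or None
def pvCut (s : List Char) : Option (List Char × List Char) :=
  match pvCutIdx s 0 0 with
  | none => none
  | some i => some (s.take i, s.drop (i + 1))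

theorem pvCut_rest_lt {s hd rest : List Char} (h : pvCut s = some (hd, rest)) :
    rest.length < s.length := by
  unfold pvCut at h
  cases s with
  | nil => simp [pvCutIdx] at h
  | cons c cs =>
    cases hidx : pvCutIdx (c :: cs) 0 0 with
    | none => simp [hidx] at h
    | some i =>
      simp [hidx] at h
      have : rest = (c :: cs).drop (i + 1) := h.2.symm
      subst this
      simp [List.length_drop]

-- the while loop over rest
def pvGoB (s : List Char) (blocks : List String) : List String :=
  match h : pvCut s with
  | none => pvEmit blocks s
  | some (hd, rest) => pvGoB rest (pvEmit blocks hd)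
termination_by s.length
decreasing_by exact pvCut_rest_lt h

def split_char_blocks_py_alt (text : String) : List String :=
  pvGoB text.toList []

-- ===== PRECONDITION & SPEC =====
def Spec_split_char_blocks_py (text : String) (out : List String) : Prop := out = split_char_blocks_py_alt text
instance (text : String) (out : List String) : Decidable (Spec_split_char_blocks_py text out) := by unfold Spec_split_char_blocks_py; infer_instance

-- ===== CLAIM (what is proved, stated in full; the proofs are below) =====
def Claim_equal_split_char_blocks_py : Prop := ∀ (text : String), Dom_split_char_blocks_py text → Spec_split_char_blocks_py text (split_char_blocks_py text)

-- ===== LEMMAS AND PROOFS =====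

-- A's loop, in recursive form (final-block emission folded in)
def pvLoopA : List Char → List String → List Char → Int → List String
  | [], blocks, current, _ => pvEmit blocks current
  | ch :: rest, blocks, current, d =>
    if ch = '(' then pvLoopA rest blocks (current ++ [ch]) (d + 1)
    else if ch = ')' then pvLoopA rest blocks (current ++ [ch]) (max 0 (d - 1))
    else if ch = '|' ∧ d = 0 then pvLoopA rest (pvEmit blocks current) [] d
    else pvLoopA rest blocks (current ++ [ch]) d

theorem pvFoldA_eq (s : List Char) (blocks : List String) (current : List Char) (d : Int) :
    (let st := s.foldl pvStepA (blocks, current, d); pvEmit st.1 st.2.1) =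
      pvLoopA s blocks current d := by
  induction s generalizing blocks current d with
  | nil => simp [pvLoopA]
  | cons ch rest ih =>
    simp only [List.foldl_cons, pvLoopA, pvStepA]
    split_ifs with h1 h2 h3 <;> simp_all [ih]

theorem pvCutIdx_shift (s : List Char) (d : Int) (i0 : Nat) :
    pvCutIdx s i0 d = (pvCutIdx s 0 d).map (fun j => i0 + j) := by
  induction s generalizing d i0 with
  | nil => simp [pvCutIdx]
  | cons ch rest ih =>
    simp only [pvCutIdx]
    split_ifs with h1 h2 h3
    · rw [ih (d + 1) (i0 + 1), ih (d + 1) 1]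
      cases pvCutIdx rest 0 (d + 1) <;> simp <;> omega
    · rw [ih (max 0 (d - 1)) (i0 + 1), ih (max 0 (d - 1)) 1]
      cases pvCutIdx rest 0 (max 0 (d - 1)) <;> simp <;> omega
    · simp
    · rw [ih d (i0 + 1), ih d 1]
      cases pvCutIdx rest 0 d <;> simp <;> omega

-- A's loop characterized by the cut scan
theorem pvLoopA_cut (s : List Char) (blocks : List String) (current : List Char) (d : Int) :
    pvLoopA s blocks current d =
      match pvCutIdx s 0 d with
      | none => pvEmit blocks (current ++ s)
      | some i => pvLoopA (s.drop (i + 1)) (pvEmit blocks (current ++ s.take i)) [] 0 := by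
  induction s generalizing blocks current d with
  | nil => simp [pvCutIdx, pvLoopA]
  | cons ch rest ih =>
    simp only [pvLoopA, pvCutIdx]
    split_ifs with h1 h2 h3
    · rw [ih, pvCutIdx_shift rest (d + 1) 1]
      cases pvCutIdx rest 0 (d + 1) with
      | none => simp
      | some i => simp [Nat.add_comm 1, List.take_succ_cons, List.drop_succ_cons]
    · rw [ih, pvCutIdx_shift rest (max 0 (d - 1)) 1]
      cases pvCutIdx rest 0 (max 0 (d - 1)) with
      | none => simp
      | some i => simp [Nat.add_comm 1, List.take_succ_cons, List.drop_succ_cons]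
    · obtain ⟨-, rfl⟩ := h3
      simp
    · rw [ih, pvCutIdx_shift rest d 1]
      cases pvCutIdx rest 0 d with
      | none => simp
      | some i => simp [Nat.add_comm 1, List.take_succ_cons, List.drop_succ_cons]

theorem pvLoopA_eq_goB (n : Nat) (s : List Char) (blocks : List String)
    (hn : s.length ≤ n) : pvLoopA s blocks [] 0 = pvGoB s blocks := by
  induction n generalizing s blocks with
  | zero =>
    have : s = [] := by cases s <;> simp_all
    subst this
    simp [pvLoopA, pvGoB, pvCut, pvCutIdx]
  | succ n ih =>
    rw [pvLoopA_cut, pvGoB]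
    unfold pvCut
    cases h : pvCutIdx s 0 0 with
    | none => simp
    | some i =>
      simp only
      apply ih
      have hs : s ≠ [] := by intro hnil; subst hnil; simp [pvCutIdx] at h
      have : 0 < s.length := List.length_pos_iff.mpr hs
      simp [List.length_drop]; omega

-- ===== VERDICT (by name: the statement is the Claim_ definition above) =====
theorem split_char_blocks_py_spec : Claim_equal_split_char_blocks_py := by
  intro text _
  unfold Spec_split_char_blocks_py split_char_blocks_py split_char_blocks_py_alt
  by_cases h : text = ""
  · subst h
    simp [pvGoB, pvCut, pvCutIdx, pvEmit, PySem.Chars.strip, PySem.Chars.lstrip, PySem.Chars.rstrip]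
  · simp only [if_neg h]
    rw [pvFoldA_eq, pvLoopA_eq_goB text.toList.length _ _ (le_refl _)]
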